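-- pv_equiv track=rewrite | github.com/AnandMaha/CS218_Algorithms | hw_4/symmetry.py | min_insert_cost
-- ===== SOURCE A (Python) =====
-- def min_insert_cost(str1, str2, cost):
--     m, n = len(str1), len(str2)
--
--     # store the min cost to make substrings equal
--     dp = [[0] * (n + 1) for _ in range(m + 1)]
--
--     for i in range(m + 1):
--         for j in range(n + 1):
--             # one of the strings is empty, insert chars from the other string
--             if i == 0:
--                 dp[i][j] = sum(cost.get(char, 0) for char in str2[:j])
--             elif j == 0:
--                 dp[i][j] = sum(cost.get(char, 0) for char in str1[:i])
--             # chars are equal, no cost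
--             elif str1[i - 1] == str2[j - 1]:
--                 dp[i][j] = dp[i - 1][j - 1]
--             else:
--                 # min cost between inserting into str1 or str2
--                 dp[i][j] = min(dp[i - 1][j] + cost.get(str1[i - 1], 0),
--                                dp[i][j - 1] + cost.get(str2[j - 1], 0))
--
--     # min cost to make the strings equal
--     return dp[m][n]
-- ===== SOURCE B (Python) =====
-- def min_insert_cost(str1, str2, cost):
--     # Identity: the cheapest common supersequence costs cost(str1)+cost(str2)-W,
--     # where W is the max-weight common subsequence; each of its inserted chars
--     # is paid once per string, so the answer is total - 2*W.
--     g = cost.get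
--     total = sum(g(c, 0) for c in str1) + sum(g(c, 0) for c in str2)
--     w = [0] * (len(str2) + 1)
--     for c1 in str1:
--         diag = 0
--         for j, c2 in enumerate(str2, 1):
--             cur = w[j]
--             w[j] = diag + g(c1, 0) if c1 == c2 else max(w[j], w[j - 1])
--             diag = cur
--     return total - 2 * w[-1]
-- ===== Notes on version B (the rewrite author's own statement) =====
-- stated objective: faster
-- what changed: B solves a different optimisation problem - a one-row MAX-weight common subsequence DP - and derives the answer from the closed-form identity answer = cost(str1)+cost(str2) - 2*W, instead of A's MIN-insertion-cost table whose boundary row/column re-sums a growing slice for every cell.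
import Mathlib
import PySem

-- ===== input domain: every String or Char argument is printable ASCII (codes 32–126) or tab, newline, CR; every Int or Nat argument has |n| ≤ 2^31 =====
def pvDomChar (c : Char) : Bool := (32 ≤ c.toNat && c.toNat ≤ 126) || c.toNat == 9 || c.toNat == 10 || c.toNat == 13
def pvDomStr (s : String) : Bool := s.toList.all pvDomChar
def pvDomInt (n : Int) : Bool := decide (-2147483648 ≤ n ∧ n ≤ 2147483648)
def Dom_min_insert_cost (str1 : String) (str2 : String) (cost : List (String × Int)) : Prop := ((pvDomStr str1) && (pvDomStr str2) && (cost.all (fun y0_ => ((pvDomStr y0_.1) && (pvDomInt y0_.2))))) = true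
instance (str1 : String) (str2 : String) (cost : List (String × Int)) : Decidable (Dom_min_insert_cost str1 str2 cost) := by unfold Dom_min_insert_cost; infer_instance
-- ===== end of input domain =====

-- B computes a max-weight common subsequence W in one DP row and returns
-- cost(str1)+cost(str2)-2*W, replacing A's min-insertion-cost table with slice re-summation.

-- shared lookup: Python's cost.get(ch, 0) for a one-character string ch
def pvGet (cost : List (String × Int)) (c : Char) : Int :=
  (PySem.Dict.ofList cost).getD (String.mk [c]) 0

-- ===== PORT A =====
def min_insert_cost (str1 : String) (str2 : String) (cost : List (String × Int)) : Int :=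
  let s1 := str1.toList
  let s2 := str2.toList
  let m := s1.length
  let n := s2.length
  let dp := (List.range (m + 1)).foldl (fun (dp : List (List Int)) (i : Nat) =>
      dp ++ [(List.range (n + 1)).foldl (fun (row : List Int) (j : Nat) =>
        row ++ [
          if i = 0 then ((s2.take j).map (pvGet cost)).sum
          else if j = 0 then ((s1.take i).map (pvGet cost)).sum
          else if s1.getD (i - 1) ' ' = s2.getD (j - 1) ' ' then
            (dp.getD (i - 1) []).getD (j - 1) 0
          else
            min ((dp.getD (i - 1) []).getD j 0 + pvGet cost (s1.getD (i - 1) ' '))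
                (row.getD (j - 1) 0 + pvGet cost (s2.getD (j - 1) ' '))]) []]) []
  (dp.getD m []).getD n 0

-- ===== PORT B =====
def min_insert_cost_alt (str1 : String) (str2 : String) (cost : List (String × Int)) : Int :=
  let s1 := str1.toList
  let s2 := str2.toList
  let total := (s1.map (pvGet cost)).sum + (s2.map (pvGet cost)).sum
  let w0 : List Int := List.replicate (s2.length + 1) 0
  let w := s1.foldl (fun (w : List Int) c1 =>
      ((s2.zip w.tail).foldl (fun (q : List Int × Int) p =>
          ((if c1 = p.1 then q.2 + pvGet cost c1 else max p.2 (q.1.headD 0)) :: q.1, p.2))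
        ([0], w.headD 0)).1.reverse) w0
  total - 2 * w.getLastD 0

-- ===== PRECONDITION & SPEC =====
def Spec_min_insert_cost (str1 : String) (str2 : String) (cost : List (String × Int)) (out : Int) : Prop := out = min_insert_cost_alt str1 str2 cost
instance (str1 : String) (str2 : String) (cost : List (String × Int)) (out : Int) : Decidable (Spec_min_insert_cost str1 str2 cost out) := by unfold Spec_min_insert_cost; infer_instance

-- ===== CLAIM (what is proved, stated in full; the proofs are below) =====
def Claim_equal_min_insert_cost : Prop := ∀ (str1 : String) (str2 : String) (cost : List (String × Int)), Dom_min_insert_cost str1 str2 cost → Spec_min_insert_cost str1 str2 cost (min_insert_cost str1 str2 cost)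

-- ===== LEMMAS AND PROOFS =====

-- the mathematical min-insertion DP (A's table), row i+1 from row i
def pvNext (g : Char → Int) (c1 : Char) (base : Int) (prev : Nat → Int) (s2 : List Char) : Nat → Int
  | 0 => base
  | j + 1 =>
    if c1 = s2.getD j ' ' then prev j
    else min (prev (j + 1) + g c1) (pvNext g c1 base prev s2 j + g (s2.getD j ' '))

def pvV (g : Char → Int) (s1 s2 : List Char) : Nat → Nat → Int
  | 0 => fun j => ((s2.take j).map g).sum
  | i + 1 => pvNext g (s1.getD i ' ') (((s1.take (i + 1)).map g).sum) (pvV g s1 s2 i) s2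

-- the mathematical max-weight common subsequence DP (B's row)
def pvWNext (g : Char → Int) (c1 : Char) (prev : Nat → Int) (s2 : List Char) : Nat → Int
  | 0 => 0
  | j + 1 =>
    if c1 = s2.getD j ' ' then prev j + g c1
    else max (prev (j + 1)) (pvWNext g c1 prev s2 j)

def pvW (g : Char → Int) (s1 s2 : List Char) : Nat → Nat → Int
  | 0 => fun _ => 0
  | i + 1 => pvWNext g (s1.getD i ' ') (pvW g s1 s2 i) s2

-- helper: getD on a mapped range
theorem pv_getD_map_range {α : Type} (f : Nat → α) (k t : Nat) (h : t < k) (d : α) :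
    ((List.range k).map f).getD t d = f t := by
  simp [List.getD_eq_getElem?_getD, h]

theorem pv_map_range_succ {α : Type} (f : Nat → α) (k : Nat) :
    (List.range (k + 1)).map f = ((List.range k).map f) ++ [f k] := by
  rw [List.range_succ, List.map_append]; rfl

theorem pv_tail_map_range {α : Type} (f : Nat → α) (k : Nat) :
    ((List.range (k + 1)).map f).tail = (List.range k).map (fun j => f (j + 1)) := by
  rw [List.range_succ_eq_map]; simp [Function.comp]

theorem pv_headD_map_range {α : Type} (f : Nat → α) (k : Nat) (d : α) :
    ((List.range (k + 1)).map f).headD d = f 0 := by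
  rw [List.range_succ_eq_map]; simp

theorem pv_getLastD_map_range {α : Type} (f : Nat → α) (k : Nat) (d : α) :
    ((List.range (k + 1)).map f).getLastD d = f k := by
  rw [pv_map_range_succ]
  simp

-- ---- A-side: the table fold computes pvV ----

theorem pvA_inner (g : Char → Int) (s1 s2 : List Char) (dp : List (List Int)) (i : Nat)
    (hdp : ∀ i', i = i' + 1 → dp.getD i' [] = (List.range (s2.length + 1)).map (pvV g s1 s2 i')) :
    ∀ j, j ≤ s2.length + 1 →
      (List.range j).foldl (fun (row : List Int) (j : Nat) =>
        row ++ [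
          if i = 0 then ((s2.take j).map g).sum
          else if j = 0 then ((s1.take i).map g).sum
          else if s1.getD (i - 1) ' ' = s2.getD (j - 1) ' ' then
            (dp.getD (i - 1) []).getD (j - 1) 0
          else
            min ((dp.getD (i - 1) []).getD j 0 + g (s1.getD (i - 1) ' '))
                (row.getD (j - 1) 0 + g (s2.getD (j - 1) ' '))]) []
      = (List.range j).map (pvV g s1 s2 i) := by
  intro j
  induction j with
  | zero => intro _; rfl
  | succ j ih =>
    intro hj
    rw [List.range_succ, List.foldl_append, ih (Nat.le_of_succ_le hj), List.foldl_cons,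
        List.foldl_nil, List.map_append]
    congr 1
    have hjn : j < s2.length + 1 := hj
    simp only [List.map_cons, List.map_nil]
    congr 1
    cases i with
    | zero => simp [pvV]
    | succ i' =>
      cases j with
      | zero => simp [pvV, pvNext]
      | succ j' =>
        have hdp' := hdp i' rfl
        have hj'n : j' < s2.length + 1 := Nat.lt_of_succ_lt hjn
        have hj1n : j' + 1 < s2.length + 1 := hjn
        simp only [Nat.succ_ne_zero, if_false, Nat.add_sub_cancel, hdp',
          pv_getD_map_range _ _ _ hj'n, pv_getD_map_range _ _ _ hj1n,
          pv_getD_map_range _ _ _ (Nat.lt_succ_self j')]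
        simp [pvV, pvNext]

theorem pvA_outer (g : Char → Int) (s1 s2 : List Char) :
    ∀ i, i ≤ s1.length + 1 →
      (List.range i).foldl (fun (dp : List (List Int)) (i : Nat) =>
        dp ++ [(List.range (s2.length + 1)).foldl (fun (row : List Int) (j : Nat) =>
          row ++ [
            if i = 0 then ((s2.take j).map g).sum
            else if j = 0 then ((s1.take i).map g).sum
            else if s1.getD (i - 1) ' ' = s2.getD (j - 1) ' ' then
              (dp.getD (i - 1) []).getD (j - 1) 0
            else
              min ((dp.getD (i - 1) []).getD j 0 + g (s1.getD (i - 1) ' '))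
                  (row.getD (j - 1) 0 + g (s2.getD (j - 1) ' '))]) []]) []
      = (List.range i).map (fun i' => (List.range (s2.length + 1)).map (pvV g s1 s2 i')) := by
  intro i
  induction i with
  | zero => intro _; rfl
  | succ i ih =>
    intro hi
    rw [List.range_succ (n := i), List.foldl_append, ih (Nat.le_of_succ_le hi), List.foldl_cons,
        List.foldl_nil, List.map_append]
    congr 1
    simp only [List.map_cons, List.map_nil]
    congr 1
    refine pvA_inner g s1 s2 _ i ?_ (s2.length + 1) (Nat.le_refl _)
    intro i' hi'
    subst hi'
    exact pv_getD_map_range _ _ _ (Nat.lt_succ_self i') _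

theorem pvA_eq (str1 str2 : String) (cost : List (String × Int)) :
    min_insert_cost str1 str2 cost
      = pvV (pvGet cost) str1.toList str2.toList str1.toList.length str2.toList.length := by
  show (((List.range (str1.toList.length + 1)).foldl _ []).getD str1.toList.length []).getD str2.toList.length 0 = _
  rw [pvA_outer (pvGet cost) str1.toList str2.toList (str1.toList.length + 1) (Nat.le_refl _)]
  rw [pv_getD_map_range _ _ _ (Nat.lt_succ_self _),
      pv_getD_map_range _ _ _ (Nat.lt_succ_self _)]

-- ---- the identity: A's min-insertion value = prefix costs minus twice the max-weight CS ----

theorem pvVW (g : Char → Int) (s1 s2 : List Char) :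
    ∀ i, i ≤ s1.length → ∀ j, j ≤ s2.length →
      pvV g s1 s2 i j
        = ((s1.take i).map g).sum + ((s2.take j).map g).sum - 2 * pvW g s1 s2 i j := by
  intro i
  induction i with
  | zero =>
    intro _ j _
    simp [pvV, pvW]
  | succ i ihi =>
    intro hi
    have hil : i < s1.length := hi
    have hc1 : ((s1.take (i + 1)).map g).sum = ((s1.take i).map g).sum + g (s1.getD i ' ') := by
      rw [List.getD_eq_getElem?_getD, List.getElem?_eq_getElem hil,
          List.take_add_one, List.getElem?_eq_getElem hil, List.map_append, List.sum_append]
      simp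
    intro j
    induction j with
    | zero =>
      intro _
      show ((s1.take (i + 1)).map g).sum = _
      simp [pvW, pvWNext]
    | succ j ihj =>
      intro hj
      have hjl : j < s2.length := hj
      have hc2 : ((s2.take (j + 1)).map g).sum = ((s2.take j).map g).sum + g (s2.getD j ' ') := by
        rw [List.getD_eq_getElem?_getD, List.getElem?_eq_getElem hjl,
            List.take_add_one, List.getElem?_eq_getElem hjl, List.map_append, List.sum_append]
        simp
      have hprev := ihi (Nat.le_of_lt hil) j (Nat.le_of_lt hjl)
      have hprev1 := ihi (Nat.le_of_lt hil) (j + 1) hj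
      have hdiag := ihj (Nat.le_of_lt hjl)
      show pvNext g (s1.getD i ' ') _ (pvV g s1 s2 i) s2 (j + 1) = _
      rw [pvNext]
      by_cases heq : s1.getD i ' ' = s2.getD j ' '
      · rw [if_pos heq, hprev]
        show _ = _ - 2 * pvWNext g (s1.getD i ' ') (pvW g s1 s2 i) s2 (j + 1)
        rw [pvWNext, if_pos heq, hc1, hc2, heq]
        ring
      · rw [if_neg heq, hprev1]
        have hcur : pvNext g (s1.getD i ' ') (((s1.take (i + 1)).map g).sum) (pvV g s1 s2 i) s2 j
            = ((s1.take (i + 1)).map g).sum + ((s2.take j).map g).sum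
              - 2 * pvW g s1 s2 (i + 1) j := hdiag
        rw [hcur]
        show _ = _ - 2 * pvWNext g (s1.getD i ' ') (pvW g s1 s2 i) s2 (j + 1)
        rw [pvWNext, if_neg heq, hc1, hc2]
        have hWd : pvW g s1 s2 (i + 1) j = pvWNext g (s1.getD i ' ') (pvW g s1 s2 i) s2 j := rfl
        rw [hWd]
        omega

-- ---- B-side: the row fold computes pvW ----

theorem pvB_inner (g : Char → Int) (s1 s2 : List Char) (i : Nat) :
    ∀ d k, k + d = s2.length →
      ((s2.zip ((List.range s2.length).map (fun j => pvW g s1 s2 i (j + 1)))).drop k).foldl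
        (fun (q : List Int × Int) p =>
          ((if s1.getD i ' ' = p.1 then q.2 + g (s1.getD i ' ')
            else max p.2 (q.1.headD 0)) :: q.1, p.2))
        ((((List.range (k + 1)).map (pvW g s1 s2 (i + 1))).reverse), pvW g s1 s2 i k)
      = ((((List.range (s2.length + 1)).map (pvW g s1 s2 (i + 1))).reverse),
         pvW g s1 s2 i s2.length) := by
  intro d
  induction d with
  | zero =>
    intro k hk
    have hkn : k = s2.length := by omega
    subst hkn
    have hd : (s2.zip ((List.range s2.length).map (fun j => pvW g s1 s2 i (j + 1)))).drop s2.length = [] := by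
      apply List.drop_eq_nil_of_le
      simp
    rw [hd, List.foldl_nil]
  | succ d ih =>
    intro k hk
    have hkl : k < s2.length := by omega
    have hzlen : k < (s2.zip ((List.range s2.length).map (fun j => pvW g s1 s2 i (j + 1)))).length := by
      simp [hkl]
    rw [List.drop_eq_getElem_cons hzlen, List.foldl_cons]
    have hget : (s2.zip ((List.range s2.length).map (fun j => pvW g s1 s2 i (j + 1))))[k]
        = (s2[k], pvW g s1 s2 i (k + 1)) := by
      rw [List.getElem_zip]
      congr 1
      rw [List.getElem_map, List.getElem_range]
    rw [hget]
    have hgetD : s2.getD k ' ' = s2[k] := by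
      rw [List.getD_eq_getElem?_getD, List.getElem?_eq_getElem hkl]; rfl
    have hhead : (((List.range (k + 1)).map (pvW g s1 s2 (i + 1))).reverse).headD 0
        = pvW g s1 s2 (i + 1) k := by
      rw [pv_map_range_succ, List.reverse_append]; rfl
    have hv : (if s1.getD i ' ' = s2[k] then pvW g s1 s2 i k + g (s1.getD i ' ')
        else max (pvW g s1 s2 i (k + 1))
          ((((List.range (k + 1)).map (pvW g s1 s2 (i + 1))).reverse).headD 0))
        = pvW g s1 s2 (i + 1) (k + 1) := by
      rw [hhead]
      show _ = pvWNext g (s1.getD i ' ') (pvW g s1 s2 i) s2 (k + 1)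
      rw [pvWNext, hgetD]
      by_cases heq : s1.getD i ' ' = s2[k]
      · rw [if_pos heq, if_pos heq, heq]
      · rw [if_neg heq, if_neg heq]; rfl
    have hrev : pvW g s1 s2 (i + 1) (k + 1) :: (((List.range (k + 1)).map (pvW g s1 s2 (i + 1))).reverse)
        = ((List.range (k + 1 + 1)).map (pvW g s1 s2 (i + 1))).reverse := by
      rw [pv_map_range_succ (pvW g s1 s2 (i + 1)) (k + 1), List.reverse_append]
      simp
    simp only [hv, hrev]
    exact ih (k + 1) (by omega)

theorem pvB_outer (g : Char → Int) (s1 s2 : List Char) :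
    ∀ d k, k + d = s1.length →
      (s1.drop k).foldl (fun (w : List Int) c1 =>
          ((s2.zip w.tail).foldl (fun (q : List Int × Int) p =>
              ((if c1 = p.1 then q.2 + g c1 else max p.2 (q.1.headD 0)) :: q.1, p.2))
            ([0], w.headD 0)).1.reverse)
        ((List.range (s2.length + 1)).map (pvW g s1 s2 k))
      = (List.range (s2.length + 1)).map (pvW g s1 s2 s1.length) := by
  intro d
  induction d with
  | zero =>
    intro k hk
    have : k = s1.length := by omega
    subst this
    rw [List.drop_length, List.foldl_nil]
  | succ d ih =>
    intro k hk
    have hkl : k < s1.length := by omega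
    rw [List.drop_eq_getElem_cons hkl, List.foldl_cons]
    have hgetD1 : s1.getD k ' ' = s1[k] := by
      rw [List.getD_eq_getElem?_getD, List.getElem?_eq_getElem hkl]; rfl
    rw [pv_tail_map_range, pv_headD_map_range]
    have hinit : (([0], pvW g s1 s2 k 0) : List Int × Int)
        = ((((List.range (0 + 1)).map (pvW g s1 s2 (k + 1))).reverse), pvW g s1 s2 k 0) := by
      show (([0], pvW g s1 s2 k 0) : List Int × Int) = ([pvW g s1 s2 (k + 1) 0], pvW g s1 s2 k 0)
      cases k with
      | zero => rfl
      | succ k' => rfl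
    rw [hinit]
    have hinner := pvB_inner g s1 s2 k s2.length 0 (by omega)
    simp only [List.drop_zero] at hinner
    rw [hgetD1] at hinner
    rw [hinner, List.reverse_reverse]
    exact ih (k + 1) (by omega)

theorem pvB_eq (str1 str2 : String) (cost : List (String × Int)) :
    min_insert_cost_alt str1 str2 cost
      = ((str1.toList).map (pvGet cost)).sum + ((str2.toList).map (pvGet cost)).sum
        - 2 * pvW (pvGet cost) str1.toList str2.toList str1.toList.length str2.toList.length := by
  unfold min_insert_cost_alt
  dsimp only
  have h0 : (List.replicate (str2.toList.length + 1) (0 : Int))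
      = (List.range (str2.toList.length + 1)).map (pvW (pvGet cost) str1.toList str2.toList 0) := by
    show _ = (List.range (str2.toList.length + 1)).map (fun _ => (0 : Int))
    simp [List.map_const']
  rw [h0]
  have houter := pvB_outer (pvGet cost) str1.toList str2.toList str1.toList.length 0 (by omega)
  simp only [List.drop_zero] at houter
  rw [houter, pv_getLastD_map_range]

-- ===== VERDICT (by name: the statement is the Claim_ definition above) =====
theorem min_insert_cost_spec : Claim_equal_min_insert_cost := by
  intro str1 str2 cost _
  unfold Spec_min_insert_cost
  rw [pvA_eq, pvB_eq,
      pvVW (pvGet cost) str1.toList str2.toList str1.toList.length (Nat.le_refl _)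
        str2.toList.length (Nat.le_refl _), List.take_length, List.take_length]
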